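-- pv_equiv track=rewrite | github.com/sdoram/Algorithm | 프로그래머스/lv1/12933. 정수 내림차순으로 배치하기/정수 내림차순으로 배치하기.py | solution
-- ===== SOURCE A (Python) =====
-- def solution(n):
--     # n을 각각 분리해서 내림차순으로 새롭게 정렬하기
--     # list로 만들고, sort를 쓰고 pop()으로 꺼내기
--     answer = ''
--     n = str(n)
--     n = list(n)
--     n.sort()
--
--     for i in range(1,len(n)+1):
--         answer += n.pop()
--     return int(answer)
-- ===== SOURCE B (Python) =====
-- def solution(n):
--     # counting-sort style: emit each digit bucket from highest to lowest
--     s = str(n)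
--     ans = ''
--     for d in '9876543210':
--         for ch in s:
--             if ch == d:
--                 ans += ch
--     return int(ans)
-- ===== Notes on version B (the rewrite author's own statement) =====
-- stated objective: alternative
-- what changed: Replaces sort-then-pop-in-reverse with a counting-sort style pass: for each digit value from highest to lowest, append every matching character of the decimal string, so no comparison sort and no list mutation.
import Mathlib
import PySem

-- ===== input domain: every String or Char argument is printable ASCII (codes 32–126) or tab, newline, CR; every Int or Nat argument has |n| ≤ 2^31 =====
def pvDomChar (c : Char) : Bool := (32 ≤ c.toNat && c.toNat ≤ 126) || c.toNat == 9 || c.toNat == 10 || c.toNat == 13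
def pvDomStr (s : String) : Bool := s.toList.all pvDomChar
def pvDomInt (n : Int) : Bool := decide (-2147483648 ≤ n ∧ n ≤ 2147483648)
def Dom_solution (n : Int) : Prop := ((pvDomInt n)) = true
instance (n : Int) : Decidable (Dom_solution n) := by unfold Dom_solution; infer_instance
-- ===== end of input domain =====

-- B replaces A's sort-then-pop-in-reverse with a counting-sort style emission of digit buckets from the highest digit to the lowest (alternative algorithm, similar cost).


-- ===== PORT A =====
def solution (n : Int) : Int :=
  let answer : List Char := []
  let s := PySem.Int.toChars n          -- n = str(n); n = list(n)
  let s := PySem.List.sorted s (fun c => c) false   -- n.sort()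
  let st := (PySem.List.pyRange 1 ((s.length : Int) + 1) 1).foldl
    (fun (st : List Char × List Char) _ =>
      match PySem.List.pop? st.2 with   -- answer += n.pop()
      | some (c, rest) => (st.1 ++ [c], rest)
      | none => st)                     -- unreachable: the loop runs exactly len(n) times
    (answer, s)
  (PySem.Int.ofChars? st.1).getD 0      -- int(answer); the none (ValueError) case is excluded by Pre_

-- ===== PORT B =====
def solution_alt (n : Int) : Int :=
  let s := PySem.Int.toChars n          -- s = str(n)
  let ans := "9876543210".toList.foldl
    (fun ans d => s.foldl (fun ans ch => if ch == d then ans ++ [ch] else ans) ans)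
    ([] : List Char)
  (PySem.Int.ofChars? ans).getD 0       -- int(ans); the none case is excluded by Pre_

-- ===== PRECONDITION & SPEC =====
-- Pre_ excludes negative n: there str(n) carries a '-' that sorts below the digits, so A's
-- int(answer) raises ValueError (A returns on no excluded input).
def Pre_solution (n : Int) : Prop := 0 ≤ n
instance (n : Int) : Decidable (Pre_solution n) := by unfold Pre_solution; infer_instance
def pvWitness_solution : Int := (42)
def Spec_solution (n : Int) (out : Int) : Prop := out = solution_alt n
instance (n : Int) (out : Int) : Decidable (Spec_solution n out) := by unfold Spec_solution; infer_instance

-- ===== CLAIM (what is proved, stated in full; the proofs are below) =====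
def Claim_equal_solution : Prop := ∀ (n : Int), Dom_solution n → Pre_solution n → Spec_solution n (solution n)

-- ===== LEMMAS AND PROOFS =====

def pvDIG : List Char := "0123456789".toList

-- every character produced by Nat.toDigitsCore at base 10 (on a digit-only accumulator) is a digit
lemma pv_mem_toDigitsCore : ∀ (fuel m : Nat) (acc : List Char),
    (∀ c ∈ acc, c ∈ pvDIG) → ∀ c ∈ Nat.toDigitsCore 10 fuel m acc, c ∈ pvDIG := by
  intro fuel
  induction fuel with
  | zero => intro m acc h c hc; rw [Nat.toDigitsCore] at hc; exact h c hc
  | succ f ih =>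
    intro m acc h c hc
    rw [Nat.toDigitsCore] at hc
    have hd : (m % 10).digitChar ∈ pvDIG := by
      have h10 : m % 10 < 10 := Nat.mod_lt _ (by norm_num)
      interval_cases h' : (m % 10) <;> decide
    have h' : ∀ c ∈ (m % 10).digitChar :: acc, c ∈ pvDIG := by
      intro c hc
      rcases List.mem_cons.mp hc with rfl | hc
      · exact hd
      · exact h c hc
    split_ifs at hc with hz
    · exact h' c hc
    · exact ih (m / 10) _ h' c hc

lemma pv_mem_toChars (n : Int) (h : 0 ≤ n) : ∀ c ∈ PySem.Int.toChars n, c ∈ pvDIG := by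
  intro c hc
  rw [PySem.Int.toChars, if_neg (by omega)] at hc
  exact pv_mem_toDigitsCore _ _ [] (by simp) c hc

-- counting inside a flatMap of per-value buckets
lemma pv_count_flatMap_rep (ds : List Char) (hnd : ds.Nodup) (l : List Char) (a : Char) :
    (ds.flatMap (fun d => List.replicate (l.count d) d)).count a
      = if a ∈ ds then l.count a else 0 := by
  induction ds with
  | nil => simp
  | cons d ds ih =>
    have hnd' := hnd
    rw [List.nodup_cons] at hnd'
    rw [List.flatMap_cons, List.count_append, List.count_replicate, ih hnd'.2]
    by_cases had : a = d
    · subst had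
      simp [hnd'.1]
    · have hba : (d == a) = false := beq_eq_false_iff_ne.mpr (fun h => had h.symm)
      rw [hba]
      simp [List.mem_cons, had]

-- the bucket concatenation over a strictly increasing value list is sorted (≤)
lemma pv_pairwise_flatMap_rep (ds : List Char) (hp : ds.Pairwise (· < ·)) (cnt : Char → Nat) :
    (ds.flatMap (fun d => List.replicate (cnt d) d)).Pairwise (· ≤ ·) := by
  induction ds with
  | nil => simp
  | cons d ds ih =>
    rw [List.pairwise_cons] at hp
    rw [List.flatMap_cons, List.pairwise_append]
    refine ⟨?_, ih hp.2, ?_⟩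
    · exact List.pairwise_replicate.mpr (Or.inr le_rfl)
    · intro a ha b hb
      have ha' := (List.eq_of_mem_replicate ha)
      rcases List.mem_flatMap.mp hb with ⟨d', hd', hb'⟩
      have hb'' := List.eq_of_mem_replicate hb'
      subst ha'; subst hb''
      exact le_of_lt (hp.1 _ hd')

lemma pv_perm_flatMap (l : List Char) (hl : ∀ c ∈ l, c ∈ pvDIG) :
    (pvDIG.flatMap (fun d => List.replicate (l.count d) d)).Perm l := by
  rw [List.perm_iff_count]
  intro a
  rw [pv_count_flatMap_rep pvDIG (by decide) l a]
  split_ifs with h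
  · rfl
  · symm
    rw [List.count_eq_zero]
    exact fun hm => h (hl a hm)

lemma pv_sorted_eq (l : List Char) (hl : ∀ c ∈ l, c ∈ pvDIG) :
    PySem.List.sorted l (fun c => c) false
      = pvDIG.flatMap (fun d => List.replicate (l.count d) d) :=
  PySem.List.sorted_id_eq_of_perm_of_pairwise _ _ (pv_perm_flatMap l hl)
    (pv_pairwise_flatMap_rep pvDIG (by decide) _)

-- A's pop loop: popping len(l) times from the end reverses the list into the accumulator
lemma pv_popLoop : ∀ (r : List Int) (l acc : List Char), r.length = l.length →
    r.foldl (fun (st : List Char × List Char) _ =>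
      match PySem.List.pop? st.2 with
      | some (c, rest) => (st.1 ++ [c], rest)
      | none => st) (acc, l) = (acc ++ l.reverse, []) := by
  intro r
  induction r with
  | nil =>
    intro l acc h
    have : l = [] := List.eq_nil_of_length_eq_zero h.symm
    subst this; simp
  | cons x r ih =>
    intro l acc h
    rcases l.eq_nil_or_concat with rfl | ⟨ys, y, rfl⟩
    · simp at h
    · simp only [List.concat_eq_append] at h ⊢
      rw [List.foldl_cons]
      simp only [PySem.List.pop?_last]
      have hlen : r.length = ys.length := by
        simp at h; omega
      rw [ih ys (acc ++ [y]) hlen]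
      simp

lemma pv_len_pyRange (m : Nat) : (PySem.List.pyRange 1 ((m : Int) + 1) 1).length = m := by
  rw [PySem.List.pyRange_of_pos _ _ (by norm_num)]
  rcases Nat.eq_zero_or_pos m with rfl | hm
  · simp
  · rw [if_pos (by omega)]
    simp

-- ===== VERDICT (by name: the statement is the Claim_ definition above) =====
theorem solution_spec : Claim_equal_solution := by
  intro n _hdom hpre
  show solution n = solution_alt n
  have hdig := pv_mem_toChars n hpre
  -- A side
  have hA : solution n
      = (PySem.Int.ofChars? (PySem.List.sorted (PySem.Int.toChars n) (fun c => c) false).reverse).getD 0 := by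
    rw [solution]
    rw [pv_popLoop _ _ _ (pv_len_pyRange _)]
    simp
  -- B side
  have hB : solution_alt n
      = (PySem.Int.ofChars? ("9876543210".toList.flatMap
          (fun d => List.replicate ((PySem.Int.toChars n).count d) d))).getD 0 := by
    rw [solution_alt]
    simp only [PySem.List.foldl_append_if_eq_filter, List.filter_beq,
      PySem.List.foldl_append_eq_flatMap, List.nil_append]
  rw [hA, hB]
  rw [pv_sorted_eq _ hdig, List.reverse_flatMap]
  have hrev : pvDIG.reverse = "9876543210".toList := by rfl
  rw [hrev]
  simp [Function.comp, List.reverse_replicate]
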